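-- pv_equiv track=rewrite | github.com/Danternas/python-stuff | Nonogram.py | nonogramfunction
-- ===== SOURCE A (Python) =====
-- def nonogramfunction(imputnonogramrow):
--     # Initiate variables. The list with the results and the integer for the number to insert into the list.
--     returnrow = []
--     appendvariable = 0
--
--     # Go through the random nonogramrow list item by item
--     for num in imputnonogramrow:
--
--         # Add 1 to appendvariable if the number is 1
--         if num == 1:
--             appendvariable += 1
--
--         # Append appendvariable into the result list if the appendvariable is more than 0, then reset appendvariable.
--         else:
--             if appendvariable != 0:
--                 returnrow.append(appendvariable)
--             appendvariable = 0
--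
--             # Extra run at the end in case the nonogramrow ends with a 1. Check if appendvariable is more than 0 and
--             # then append that as well.
--
--     if appendvariable != 0:
--         returnrow.append(appendvariable)
--
--     # Return the result
--     return returnrow
-- ===== SOURCE B (Python) =====
-- def nonogramfunction(imputnonogramrow):
--     # Two-pointer run scan: for each position starting a run of 1s, jump to its
--     # end and record the run length directly; no running accumulator to reset.
--     res = []
--     i = 0
--     n = len(imputnonogramrow)
--     while i < n:
--         if imputnonogramrow[i] == 1:
--             j = i + 1
--             while j < n and imputnonogramrow[j] == 1:
--                 j += 1
--             res.append(j - i)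
--             i = j
--         else:
--             i += 1
--     return res
-- ===== Notes on version B (the rewrite author's own statement) =====
-- stated objective: alternative
-- what changed: Replaces A's running accumulator with reset-and-append bookkeeping (plus a duplicated end-of-loop flush) by a two-pointer scan that, at each run start, jumps to the run's end and appends the run length directly.
import Mathlib
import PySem

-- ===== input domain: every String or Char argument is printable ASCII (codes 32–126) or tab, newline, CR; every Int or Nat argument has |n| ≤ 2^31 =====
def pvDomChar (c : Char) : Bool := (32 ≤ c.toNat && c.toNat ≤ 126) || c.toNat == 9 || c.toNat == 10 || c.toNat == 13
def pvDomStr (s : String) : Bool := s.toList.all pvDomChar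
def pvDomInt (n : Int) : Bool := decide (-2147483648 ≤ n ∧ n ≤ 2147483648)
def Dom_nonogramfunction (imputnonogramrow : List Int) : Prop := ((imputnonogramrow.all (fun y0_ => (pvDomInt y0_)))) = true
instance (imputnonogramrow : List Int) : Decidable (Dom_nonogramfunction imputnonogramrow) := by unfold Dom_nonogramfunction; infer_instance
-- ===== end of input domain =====

-- B replaces A's running-accumulator-with-reset loop by a two-pointer run scan that
-- consumes each run of 1s at once and appends its length (objective: alternative).
-- ===== PORT A =====
def nonogramfunction (imputnonogramrow : List Int) : List Int :=
  let st := imputnonogramrow.foldl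
    (fun (p : List Int × Int) num =>
      if num = 1 then (p.1, p.2 + 1)
      else (if p.2 ≠ 0 then p.1 ++ [p.2] else p.1, 0))
    ([], 0)
  if st.2 ≠ 0 then st.1 ++ [st.2] else st.1

-- ===== PORT B =====
-- Two-pointer run scan: at a run start, take the whole run of 1s at once
-- (inner while-loop = takeWhile/dropWhile on the remainder), append its length.
def nonogramfunction_alt : List Int → List Int
  | [] => []
  | x :: xs =>
    if x = 1 then
      (1 + ((xs.takeWhile (fun y => y = 1)).length : Int))
        :: nonogramfunction_alt (xs.dropWhile (fun y => y = 1))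
    else
      nonogramfunction_alt xs
termination_by l => l.length
decreasing_by
  · exact Nat.lt_succ_of_le (List.length_dropWhile_le _ _)
  · exact Nat.lt_succ_self _

-- ===== PRECONDITION & SPEC =====
def Spec_nonogramfunction (imputnonogramrow : List Int) (out : List Int) : Prop := out = nonogramfunction_alt imputnonogramrow
instance (imputnonogramrow : List Int) (out : List Int) : Decidable (Spec_nonogramfunction imputnonogramrow out) := by unfold Spec_nonogramfunction; infer_instance

-- ===== CLAIM (what is proved, stated in full; the proofs are below) =====
def Claim_equal_nonogramfunction : Prop := ∀ (imputnonogramrow : List Int), Dom_nonogramfunction imputnonogramrow → Spec_nonogramfunction imputnonogramrow (nonogramfunction imputnonogramrow)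

-- ===== LEMMAS AND PROOFS =====

-- A's pending-run state, expressed on the remaining input.
def nfAux (a : Int) : List Int → List Int
  | [] => if a ≠ 0 then [a] else []
  | x :: xs =>
    if x = 1 then nfAux (a + 1) xs
    else (if a ≠ 0 then [a] else []) ++ nfAux 0 xs

theorem nfAux_pos (l : List Int) : ∀ a : Int, 0 < a →
    nfAux a l = (a + ((l.takeWhile (fun y => y = 1)).length : Int))
      :: nfAux 0 (l.dropWhile (fun y => y = 1)) := by
  induction l with
  | nil => intro a ha; simp [nfAux]; omega
  | cons x xs ih =>
    intro a ha
    by_cases hx : x = 1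
    · simp [nfAux, hx, List.takeWhile, List.dropWhile, ih (a + 1) (by omega)]
      ring_nf
    · have ha' : a ≠ 0 := by omega
      simp [nfAux, hx, ha', List.takeWhile, List.dropWhile]

theorem alt_eq_nfAux (l : List Int) : nonogramfunction_alt l = nfAux 0 l := by
  induction l using nonogramfunction_alt.induct with
  | case1 => simp [nonogramfunction_alt, nfAux]
  | case2 xs ih =>
    rw [nonogramfunction_alt, if_pos rfl, nfAux, if_pos rfl, ih,
      nfAux_pos xs (0 + 1) (by omega)]
    simp
  | case3 x xs hx ih =>
    rw [nonogramfunction_alt, if_neg hx, nfAux, if_neg hx, ih]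
    simp

theorem foldl_eq_nfAux (l : List Int) : ∀ (r : List Int) (a : Int),
    (let st := l.foldl
      (fun (p : List Int × Int) num =>
        if num = 1 then (p.1, p.2 + 1)
        else (if p.2 ≠ 0 then p.1 ++ [p.2] else p.1, 0)) (r, a)
     if st.2 ≠ 0 then st.1 ++ [st.2] else st.1) = r ++ nfAux a l := by
  induction l with
  | nil => intro r a; by_cases h : a = 0 <;> simp [nfAux, h]
  | cons x xs ih =>
    intro r a
    by_cases hx : x = 1
    · simpa [hx, nfAux] using ih r (a + 1)
    · by_cases ha : a = 0
      · simpa [hx, ha, nfAux] using ih r 0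
      · simpa [hx, ha, nfAux] using ih (r ++ [a]) 0

-- ===== VERDICT (by name: the statement is the Claim_ definition above) =====
theorem nonogramfunction_spec : Claim_equal_nonogramfunction := by
  intro l _
  unfold Spec_nonogramfunction nonogramfunction
  rw [alt_eq_nfAux]
  simpa using foldl_eq_nfAux l [] 0
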